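-- pv_equiv track=rewrite | github.com/Seoyoung2/Algorithm_Study | Programmers/Level1/키패드 누르기.py | solution
-- ===== SOURCE A (Python) =====
-- from collections import deque
--
-- def bfs(here, hand, left, right):
--     cnt = [[-1] * 3 for _ in range(4)]
--     cnt[here[0]][here[1]] = 0
--     q = deque([here])
--     while q:
--         x, y = q.popleft()
--         for dx, dy in (1, 0), (-1, 0), (0, 1), (0, -1):
--             if 0 <= x + dx < 4 and 0 <= y + dy < 3 and cnt[x + dx][y + dy] == -1:
--                 cnt[x + dx][y + dy] = cnt[x][y] + 1
--                 q.append((x + dx, y + dy))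
--
--     l = cnt[left[0]][left[1]]
--     r = cnt[right[0]][right[1]]
--     if l > r:
--         return "R"
--     elif r > l:
--         return "L"
--     else:
--         return str.upper(hand[0])
--
-- def solution(numbers, hand):
--     ans = ""
--     left, right = (3, 0), (3, 2)
--     cur = [(3, 1), (0, 0), (0, 1), (0, 2), (1, 0), (1, 1), (1, 2), (2, 0), (2, 1), (2, 2)]
--     for n in numbers:
--         n = int(n)
--         if n in [1, 4, 7]:
--             ans += "L"
--             left = cur[n]
--         elif n in [3, 6, 9]:
--             ans += "R"
--             right = cur[n]
--         else:
--             tmp = bfs(cur[n], hand, left, right)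
--             ans += tmp
--             if tmp == 'R':
--                 right = cur[n]
--             else:
--                 left = cur[n]
--     return ans
-- ===== SOURCE B (Python) =====
-- POS = {1: (0, 0), 2: (0, 1), 3: (0, 2),
--        4: (1, 0), 5: (1, 1), 6: (1, 2),
--        7: (2, 0), 8: (2, 1), 9: (2, 2),
--        0: (3, 1)}
--
-- def solution(numbers, hand):
--     left, right = (3, 0), (3, 2)
--     presses = []
--     for n in numbers:
--         r, c = POS[n]
--         if c == 0:
--             ch = "L"
--         elif c == 2:
--             ch = "R"
--         else:
--             dl = abs(left[0] - r) + abs(left[1] - c)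
--             dr = abs(right[0] - r) + abs(right[1] - c)
--             ch = "R" if dl > dr else ("L" if dr > dl else hand[0].upper())
--         if ch == "R":
--             right = (r, c)
--         else:
--             left = (r, c)
--         presses.append(ch)
--     return "".join(presses)
-- ===== Notes on version B (the rewrite author's own statement) =====
-- stated objective: simpler
-- what changed: Replaces the per-press BFS over the keypad grid with a direct Manhattan-distance comparison (exact since the grid has no obstacles), uses a digit-to-coordinate dict with a column-based branch instead of membership lists, and joins a list of presses instead of string concatenation.
-- outside the precondition, e.g. on solution([-1], 'right'): A returns 'R', B raises KeyError; on solution([1, 2], ''): A returns 'LL', B returns 'LL'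
import Mathlib
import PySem

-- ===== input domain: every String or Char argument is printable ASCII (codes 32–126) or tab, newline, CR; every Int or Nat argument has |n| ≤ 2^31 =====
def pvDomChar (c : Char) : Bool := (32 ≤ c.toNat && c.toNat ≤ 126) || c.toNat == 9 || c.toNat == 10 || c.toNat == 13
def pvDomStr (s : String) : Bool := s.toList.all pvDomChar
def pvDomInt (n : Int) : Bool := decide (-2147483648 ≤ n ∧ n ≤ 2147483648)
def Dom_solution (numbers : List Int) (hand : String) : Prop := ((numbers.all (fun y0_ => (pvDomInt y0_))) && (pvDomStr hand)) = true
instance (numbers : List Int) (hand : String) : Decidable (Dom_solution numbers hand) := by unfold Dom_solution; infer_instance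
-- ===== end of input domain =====

-- B replaces A's per-press BFS by a Manhattan-distance comparison (exact on the obstacle-free
-- grid) with a digit→coordinate dict and a column test; equivalence is proved on keypad digits 0–9.

-- ===== PORT A =====

-- str.upper(hand[0]): hand[0] raises IndexError on the empty string (excluded by Pre_); exact otherwise.
def tieCharA (hand : String) : String :=
  PySem.Str.upper (match PySem.Str.pyGet? hand 0 with
    | some c => String.ofList [c]
    | none => "")

-- cnt[x][y] read; indices reached by A are always in range (getD value is never used there).
def g2 (cnt : List (List Int)) (x y : Int) : Int :=
  (((PySem.List.pyGet? cnt x).bind (fun row => PySem.List.pyGet? row y)).getD (-1))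

-- cnt[x][y] = v; exact for the in-range nonnegative indices A uses.
def set2 (cnt : List (List Int)) (x y v : Int) : List (List Int) :=
  if 0 ≤ x ∧ x < cnt.length then
    match (PySem.List.pyGet? cnt x) with
    | some row => if 0 ≤ y ∧ y < row.length then cnt.set x.toNat (row.set y.toNat v) else cnt
    | none => cnt
  else cnt

-- one pass over the four direction offsets, threading (queue, cnt)
def bfsDirs (x y : Int) (st : List (Int × Int) × List (List Int)) : List (Int × Int) × List (List Int) :=
  [((1 : Int), (0 : Int)), (-1, 0), (0, 1), (0, -1)].foldl
    (fun (st : List (Int × Int) × List (List Int)) d =>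
      let (q, cnt) := st
      let (dx, dy) := d
      if 0 ≤ x + dx ∧ x + dx < 4 ∧ 0 ≤ y + dy ∧ y + dy < 3 ∧ g2 cnt (x + dx) (y + dy) = -1 then
        (q ++ [(x + dx, y + dy)], set2 cnt (x + dx) (y + dy) (g2 cnt x y + 1))
      else st) st

-- the while loop; fuel only makes it total (≤ 13 iterations ever happen: each cell is enqueued once)
def bfsLoop : Nat → List (Int × Int) → List (List Int) → List (List Int)
  | 0, _, cnt => cnt
  | _ + 1, [], cnt => cnt
  | fuel + 1, (x, y) :: q, cnt =>
    let st := bfsDirs x y (q, cnt)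
    bfsLoop fuel st.1 st.2

def bfsA (here : Int × Int) (hand : String) (left right : Int × Int) : String :=
  let cnt0 : List (List Int) := [[-1, -1, -1], [-1, -1, -1], [-1, -1, -1], [-1, -1, -1]]
  let cnt1 := set2 cnt0 here.1 here.2 0
  let cnt := bfsLoop 64 [here] cnt1
  let l := g2 cnt left.1 left.2
  let r := g2 cnt right.1 right.2
  if l > r then "R" else if r > l then "L" else tieCharA hand

def curA : List (Int × Int) :=
  [(3, 1), (0, 0), (0, 1), (0, 2), (1, 0), (1, 1), (1, 2), (2, 0), (2, 1), (2, 2)]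

-- cur[n]; in range for every index A survives (getD default never used inside Pre_)
def getCur (n : Int) : Int × Int := (PySem.List.pyGet? curA n).getD (0, 0)

def aLoop (hand : String) : List Int → String → Int × Int → Int × Int → String
  | [], ans, _, _ => ans
  | n :: ns, ans, left, right =>
    if ([1, 4, 7] : List Int).contains n then
      aLoop hand ns (ans ++ "L") (getCur n) right
    else if ([3, 6, 9] : List Int).contains n then
      aLoop hand ns (ans ++ "R") left (getCur n)
    else
      let tmp := bfsA (getCur n) hand left right
      if tmp = "R" then aLoop hand ns (ans ++ tmp) left (getCur n)
      else aLoop hand ns (ans ++ tmp) (getCur n) right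

def solution (numbers : List Int) (hand : String) : String :=
  aLoop hand numbers "" (3, 0) (3, 2)

-- ===== PORT B =====

-- hand[0].upper(): same Python expression as in A's tie branch
def tieCharB (hand : String) : String :=
  PySem.Str.upper (match PySem.Str.pyGet? hand 0 with
    | some c => String.ofList [c]
    | none => "")

def posB : PySem.Dict Int (Int × Int) :=
  PySem.Dict.ofList [(1, (0, 0)), (2, (0, 1)), (3, (0, 2)), (4, (1, 0)), (5, (1, 1)),
                     (6, (1, 2)), (7, (2, 0)), (8, (2, 1)), (9, (2, 2)), (0, (3, 1))]

-- POS[n]; KeyError (none) only outside Pre_, where the default is never used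
def posOf (n : Int) : Int × Int := (PySem.Dict.get? posB n).getD (0, 0)

def bLoop (hand : String) : List Int → Int × Int → Int × Int → List String
  | [], _, _ => []
  | n :: ns, left, right =>
    let rc := posOf n
    let ch :=
      if rc.2 = 0 then "L"
      else if rc.2 = 2 then "R"
      else
        let dl := |left.1 - rc.1| + |left.2 - rc.2|
        let dr := |right.1 - rc.1| + |right.2 - rc.2|
        if dl > dr then "R" else if dr > dl then "L" else tieCharB hand
    if ch = "R" then ch :: bLoop hand ns left rc
    else ch :: bLoop hand ns rc right

def solution_alt (numbers : List Int) (hand : String) : String :=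
  String.join (bLoop hand numbers (3, 0) (3, 2))

-- ===== PRECONDITION & SPEC =====
-- Pre_ excludes (a) any entry outside 0–9: A raises IndexError for |n| ≥ 10 and returns only by
-- Python's accidental negative-index wraparound for -10 ≤ n ≤ -1, while B raises KeyError there;
-- (b) an empty hand together with a middle-column digit (0/2/5/8), where a tie makes both
-- programs raise IndexError on hand[0] (on the non-tie part of (b) both return the same value).
def Pre_solution (numbers : List Int) (hand : String) : Prop :=
  (∀ n ∈ numbers, 0 ≤ n ∧ n ≤ 9) ∧
  (hand ≠ "" ∨ ∀ n ∈ numbers, ¬(n = 0 ∨ n = 2 ∨ n = 5 ∨ n = 8))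
instance (numbers : List Int) (hand : String) : Decidable (Pre_solution numbers hand) := by
  unfold Pre_solution; infer_instance

def pvWitness_solution : List Int × String := ([1, 3, 4, 5, 8, 2, 1, 4, 5, 9, 5], "right")

def Spec_solution (numbers : List Int) (hand : String) (out : String) : Prop := out = solution_alt numbers hand
instance (numbers : List Int) (hand : String) (out : String) : Decidable (Spec_solution numbers hand out) := by unfold Spec_solution; infer_instance

-- ===== CLAIM (what is proved, stated in full; the proofs are below) =====
def Claim_equal_solution : Prop := ∀ (numbers : List Int) (hand : String), Dom_solution numbers hand → Pre_solution numbers hand → Spec_solution numbers hand (solution numbers hand)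

-- ===== LEMMAS AND PROOFS =====

-- the 12 keypad cells; both hands always sit on one of them
def cellsP : List (Int × Int) :=
  [(0, 0), (0, 1), (0, 2), (1, 0), (1, 1), (1, 2), (2, 0), (2, 1), (2, 2), (3, 0), (3, 1), (3, 2)]

-- the 4 middle-column cells, the only BFS sources
def cellsM : List (Int × Int) := [(3, 1), (0, 1), (1, 1), (2, 1)]

theorem join_cons (s : String) (l : List String) : String.join (s :: l) = s ++ String.join l := by
  have key : ∀ (l : List String) (a : String),
      List.foldl (fun acc x => acc ++ x) a l = a ++ List.foldl (fun acc x => acc ++ x) "" l := by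
    intro l
    induction l with
    | nil => intro a; simp
    | cons x xs ih =>
      intro a
      simp only [List.foldl]
      rw [ih (a ++ x), ih ("" ++ x), String.append_assoc]
      simp
  simp only [String.join, List.foldl]
  rw [key l ("" ++ s), String.append_assoc]
  simp

-- BFS distance on the obstacle-free grid equals Manhattan distance
theorem grid_dist (here p : Int × Int) (hh : here ∈ cellsM) (hp : p ∈ cellsP) :
    g2 (bfsLoop 64 [here]
         (set2 [[-1, -1, -1], [-1, -1, -1], [-1, -1, -1], [-1, -1, -1]] here.1 here.2 0))
       p.1 p.2 = |p.1 - here.1| + |p.2 - here.2| := by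
  fin_cases hh <;> fin_cases hp <;> decide

theorem bfs_eq (h1 h2 : Int) (left right : Int × Int) (hand : String)
    (hh : ((h1, h2) : Int × Int) ∈ cellsM) (hl : left ∈ cellsP) (hr : right ∈ cellsP) :
    bfsA (h1, h2) hand left right =
      (if |left.1 - h1| + |left.2 - h2| > |right.1 - h1| + |right.2 - h2| then "R"
       else if |right.1 - h1| + |right.2 - h2| > |left.1 - h1| + |left.2 - h2| then "L"
       else tieCharB hand) := by
  unfold bfsA tieCharA tieCharB
  dsimp only
  rw [grid_dist (h1, h2) left hh hl, grid_dist (h1, h2) right hh hr]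

theorem aLoop_0 (hand : String) (ns : List Int) (ans : String) (l r : Int × Int) :
    aLoop hand (0 :: ns) ans l r =
      (if bfsA ((3 : Int), (1 : Int)) hand l r = "R" then aLoop hand ns (ans ++ bfsA ((3 : Int), (1 : Int)) hand l r) l ((3 : Int), (1 : Int))
       else aLoop hand ns (ans ++ bfsA ((3 : Int), (1 : Int)) hand l r) ((3 : Int), (1 : Int)) r) := rfl
theorem aLoop_1 (hand : String) (ns : List Int) (ans : String) (l r : Int × Int) :
    aLoop hand (1 :: ns) ans l r = aLoop hand ns (ans ++ "L") ((0 : Int), (0 : Int)) r := rfl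
theorem aLoop_2 (hand : String) (ns : List Int) (ans : String) (l r : Int × Int) :
    aLoop hand (2 :: ns) ans l r =
      (if bfsA ((0 : Int), (1 : Int)) hand l r = "R" then aLoop hand ns (ans ++ bfsA ((0 : Int), (1 : Int)) hand l r) l ((0 : Int), (1 : Int))
       else aLoop hand ns (ans ++ bfsA ((0 : Int), (1 : Int)) hand l r) ((0 : Int), (1 : Int)) r) := rfl
theorem aLoop_3 (hand : String) (ns : List Int) (ans : String) (l r : Int × Int) :
    aLoop hand (3 :: ns) ans l r = aLoop hand ns (ans ++ "R") l ((0 : Int), (2 : Int)) := rfl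
theorem aLoop_4 (hand : String) (ns : List Int) (ans : String) (l r : Int × Int) :
    aLoop hand (4 :: ns) ans l r = aLoop hand ns (ans ++ "L") ((1 : Int), (0 : Int)) r := rfl
theorem aLoop_5 (hand : String) (ns : List Int) (ans : String) (l r : Int × Int) :
    aLoop hand (5 :: ns) ans l r =
      (if bfsA ((1 : Int), (1 : Int)) hand l r = "R" then aLoop hand ns (ans ++ bfsA ((1 : Int), (1 : Int)) hand l r) l ((1 : Int), (1 : Int))
       else aLoop hand ns (ans ++ bfsA ((1 : Int), (1 : Int)) hand l r) ((1 : Int), (1 : Int)) r) := rfl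
theorem aLoop_6 (hand : String) (ns : List Int) (ans : String) (l r : Int × Int) :
    aLoop hand (6 :: ns) ans l r = aLoop hand ns (ans ++ "R") l ((1 : Int), (2 : Int)) := rfl
theorem aLoop_7 (hand : String) (ns : List Int) (ans : String) (l r : Int × Int) :
    aLoop hand (7 :: ns) ans l r = aLoop hand ns (ans ++ "L") ((2 : Int), (0 : Int)) r := rfl
theorem aLoop_8 (hand : String) (ns : List Int) (ans : String) (l r : Int × Int) :
    aLoop hand (8 :: ns) ans l r =
      (if bfsA ((2 : Int), (1 : Int)) hand l r = "R" then aLoop hand ns (ans ++ bfsA ((2 : Int), (1 : Int)) hand l r) l ((2 : Int), (1 : Int))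
       else aLoop hand ns (ans ++ bfsA ((2 : Int), (1 : Int)) hand l r) ((2 : Int), (1 : Int)) r) := rfl
theorem aLoop_9 (hand : String) (ns : List Int) (ans : String) (l r : Int × Int) :
    aLoop hand (9 :: ns) ans l r = aLoop hand ns (ans ++ "R") l ((2 : Int), (2 : Int)) := rfl

theorem bLoop_0 (hand : String) (ns : List Int) (l r : Int × Int) :
    bLoop hand (0 :: ns) l r =
      (let ch := if |l.1 - 3| + |l.2 - 1| > |r.1 - 3| + |r.2 - 1| then "R"
                 else if |r.1 - 3| + |r.2 - 1| > |l.1 - 3| + |l.2 - 1| then "L"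
                 else tieCharB hand
       if ch = "R" then ch :: bLoop hand ns l ((3 : Int), (1 : Int)) else ch :: bLoop hand ns ((3 : Int), (1 : Int)) r) := rfl
theorem bLoop_1 (hand : String) (ns : List Int) (l r : Int × Int) :
    bLoop hand (1 :: ns) l r = "L" :: bLoop hand ns ((0 : Int), (0 : Int)) r := rfl
theorem bLoop_2 (hand : String) (ns : List Int) (l r : Int × Int) :
    bLoop hand (2 :: ns) l r =
      (let ch := if |l.1 - 0| + |l.2 - 1| > |r.1 - 0| + |r.2 - 1| then "R"
                 else if |r.1 - 0| + |r.2 - 1| > |l.1 - 0| + |l.2 - 1| then "L"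
                 else tieCharB hand
       if ch = "R" then ch :: bLoop hand ns l ((0 : Int), (1 : Int)) else ch :: bLoop hand ns ((0 : Int), (1 : Int)) r) := rfl
theorem bLoop_3 (hand : String) (ns : List Int) (l r : Int × Int) :
    bLoop hand (3 :: ns) l r = "R" :: bLoop hand ns l ((0 : Int), (2 : Int)) := rfl
theorem bLoop_4 (hand : String) (ns : List Int) (l r : Int × Int) :
    bLoop hand (4 :: ns) l r = "L" :: bLoop hand ns ((1 : Int), (0 : Int)) r := rfl
theorem bLoop_5 (hand : String) (ns : List Int) (l r : Int × Int) :
    bLoop hand (5 :: ns) l r =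
      (let ch := if |l.1 - 1| + |l.2 - 1| > |r.1 - 1| + |r.2 - 1| then "R"
                 else if |r.1 - 1| + |r.2 - 1| > |l.1 - 1| + |l.2 - 1| then "L"
                 else tieCharB hand
       if ch = "R" then ch :: bLoop hand ns l ((1 : Int), (1 : Int)) else ch :: bLoop hand ns ((1 : Int), (1 : Int)) r) := rfl
theorem bLoop_6 (hand : String) (ns : List Int) (l r : Int × Int) :
    bLoop hand (6 :: ns) l r = "R" :: bLoop hand ns l ((1 : Int), (2 : Int)) := rfl
theorem bLoop_7 (hand : String) (ns : List Int) (l r : Int × Int) :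
    bLoop hand (7 :: ns) l r = "L" :: bLoop hand ns ((2 : Int), (0 : Int)) r := rfl
theorem bLoop_8 (hand : String) (ns : List Int) (l r : Int × Int) :
    bLoop hand (8 :: ns) l r =
      (let ch := if |l.1 - 2| + |l.2 - 1| > |r.1 - 2| + |r.2 - 1| then "R"
                 else if |r.1 - 2| + |r.2 - 1| > |l.1 - 2| + |l.2 - 1| then "L"
                 else tieCharB hand
       if ch = "R" then ch :: bLoop hand ns l ((2 : Int), (1 : Int)) else ch :: bLoop hand ns ((2 : Int), (1 : Int)) r) := rfl
theorem bLoop_9 (hand : String) (ns : List Int) (l r : Int × Int) :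
    bLoop hand (9 :: ns) l r = "R" :: bLoop hand ns l ((2 : Int), (2 : Int)) := rfl

theorem loop_eq (hand : String) (ns : List Int) :
    ∀ (ans : String) (left right : Int × Int),
      (∀ n ∈ ns, 0 ≤ n ∧ n ≤ 9) → left ∈ cellsP → right ∈ cellsP →
      aLoop hand ns ans left right = ans ++ String.join (bLoop hand ns left right) := by
  induction ns with
  | nil => intro ans left right _ _ _; simp [aLoop, bLoop, String.join]
  | cons n ns ih =>
    intro ans left right hd hl hr
    have hrest : ∀ m ∈ ns, 0 ≤ m ∧ m ≤ 9 := fun m hm => hd m (List.mem_cons_of_mem _ hm)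
    obtain ⟨h0, h9⟩ := hd n List.mem_cons_self
    interval_cases n
    · -- n = 0
      rw [aLoop_0, bLoop_0, bfs_eq 3 1 left right hand (by decide) hl hr]
      dsimp only
      generalize (if |left.1 - 3| + |left.2 - 1| > |right.1 - 3| + |right.2 - 1| then "R"
          else if |right.1 - 3| + |right.2 - 1| > |left.1 - 3| + |left.2 - 1| then "L"
          else tieCharB hand) = ch
      by_cases hch : ch = "R"
      · rw [if_pos hch, if_pos hch, ih _ _ _ hrest hl (by decide), join_cons, String.append_assoc]
      · rw [if_neg hch, if_neg hch, ih _ _ _ hrest (by decide) hr, join_cons, String.append_assoc]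
    · -- n = 1
      rw [aLoop_1, bLoop_1, ih _ _ _ hrest (by decide) hr, join_cons, String.append_assoc]
    · -- n = 2
      rw [aLoop_2, bLoop_2, bfs_eq 0 1 left right hand (by decide) hl hr]
      dsimp only
      generalize (if |left.1 - 0| + |left.2 - 1| > |right.1 - 0| + |right.2 - 1| then "R"
          else if |right.1 - 0| + |right.2 - 1| > |left.1 - 0| + |left.2 - 1| then "L"
          else tieCharB hand) = ch
      by_cases hch : ch = "R"
      · rw [if_pos hch, if_pos hch, ih _ _ _ hrest hl (by decide), join_cons, String.append_assoc]
      · rw [if_neg hch, if_neg hch, ih _ _ _ hrest (by decide) hr, join_cons, String.append_assoc]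
    · -- n = 3
      rw [aLoop_3, bLoop_3, ih _ _ _ hrest hl (by decide), join_cons, String.append_assoc]
    · -- n = 4
      rw [aLoop_4, bLoop_4, ih _ _ _ hrest (by decide) hr, join_cons, String.append_assoc]
    · -- n = 5
      rw [aLoop_5, bLoop_5, bfs_eq 1 1 left right hand (by decide) hl hr]
      dsimp only
      generalize (if |left.1 - 1| + |left.2 - 1| > |right.1 - 1| + |right.2 - 1| then "R"
          else if |right.1 - 1| + |right.2 - 1| > |left.1 - 1| + |left.2 - 1| then "L"
          else tieCharB hand) = ch
      by_cases hch : ch = "R"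
      · rw [if_pos hch, if_pos hch, ih _ _ _ hrest hl (by decide), join_cons, String.append_assoc]
      · rw [if_neg hch, if_neg hch, ih _ _ _ hrest (by decide) hr, join_cons, String.append_assoc]
    · -- n = 6
      rw [aLoop_6, bLoop_6, ih _ _ _ hrest hl (by decide), join_cons, String.append_assoc]
    · -- n = 7
      rw [aLoop_7, bLoop_7, ih _ _ _ hrest (by decide) hr, join_cons, String.append_assoc]
    · -- n = 8
      rw [aLoop_8, bLoop_8, bfs_eq 2 1 left right hand (by decide) hl hr]
      dsimp only
      generalize (if |left.1 - 2| + |left.2 - 1| > |right.1 - 2| + |right.2 - 1| then "R"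
          else if |right.1 - 2| + |right.2 - 1| > |left.1 - 2| + |left.2 - 1| then "L"
          else tieCharB hand) = ch
      by_cases hch : ch = "R"
      · rw [if_pos hch, if_pos hch, ih _ _ _ hrest hl (by decide), join_cons, String.append_assoc]
      · rw [if_neg hch, if_neg hch, ih _ _ _ hrest (by decide) hr, join_cons, String.append_assoc]
    · -- n = 9
      rw [aLoop_9, bLoop_9, ih _ _ _ hrest hl (by decide), join_cons, String.append_assoc]

-- ===== VERDICT (by name: the statement is the Claim_ definition above) =====
theorem solution_spec : Claim_equal_solution := by
  intro numbers hand _ hpre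
  unfold Spec_solution solution solution_alt
  exact loop_eq hand numbers "" (3, 0) (3, 2) hpre.1 (by decide) (by decide)
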